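-- pv_equiv track=rewrite | github.com/FreddieW1234/SpecciRebuild | modules/finished_products/explosion.py | calculate_allergens_from_explosion
-- ===== SOURCE A (Python) =====
-- ALLERGENS = [
--     'Celery', 'Cereals containing gluten', 'Crustaceans', 'Eggs', 'Fish',
--     'Lupin', 'Milk', 'Molluscs', 'Mustard', 'Nuts', 'Peanuts',
--     'Sesame seeds', 'Soya', 'Sulphur dioxide and sulphites',
-- ]
--
-- def calculate_allergens_from_explosion(explosion_rows):
--     """
--     Calculate allergen status from explosion rows.
--     Returns dict: allergen_name → 'Contains' | 'May Contain' | 'Free From'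
--     """
--     result = {}
--     for allergen in ALLERGENS:
--         status = 'Free From'
--         for row in explosion_rows:
--             if row.get('allergen_contains', {}).get(allergen):
--                 status = 'Contains'
--                 break
--             if row.get('allergen_may_contain', {}).get(allergen):
--                 status = 'May Contain'
--         result[allergen] = status
--     return result
-- ===== SOURCE B (Python) =====
-- ALLERGENS = [
--     'Celery', 'Cereals containing gluten', 'Crustaceans', 'Eggs', 'Fish',
--     'Lupin', 'Milk', 'Molluscs', 'Mustard', 'Nuts', 'Peanuts',
--     'Sesame seeds', 'Soya', 'Sulphur dioxide and sulphites',
-- ]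
--
-- def calculate_allergens_from_explosion(explosion_rows):
--     """Single accumulating pass over the rows, then one precedence resolution."""
--     contains = set()
--     may_contain = set()
--     for row in explosion_rows:
--         ac = row.get('allergen_contains', {})
--         am = row.get('allergen_may_contain', {})
--         for allergen in ALLERGENS:
--             if ac.get(allergen):
--                 contains.add(allergen)
--             if am.get(allergen):
--                 may_contain.add(allergen)
--     return {
--         allergen: ('Contains' if allergen in contains
--                    else 'May Contain' if allergen in may_contain
--                    else 'Free From')
--         for allergen in ALLERGENS
--     }
-- ===== Notes on version B (the rewrite author's own statement) =====
-- stated objective: alternative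
-- what changed: Replaces the 14 per-allergen rescans of explosion_rows (with break/status state) by one accumulating pass over the rows building 'contains'/'may_contain' sets, followed by a precedence resolution over ALLERGENS.
import Mathlib
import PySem

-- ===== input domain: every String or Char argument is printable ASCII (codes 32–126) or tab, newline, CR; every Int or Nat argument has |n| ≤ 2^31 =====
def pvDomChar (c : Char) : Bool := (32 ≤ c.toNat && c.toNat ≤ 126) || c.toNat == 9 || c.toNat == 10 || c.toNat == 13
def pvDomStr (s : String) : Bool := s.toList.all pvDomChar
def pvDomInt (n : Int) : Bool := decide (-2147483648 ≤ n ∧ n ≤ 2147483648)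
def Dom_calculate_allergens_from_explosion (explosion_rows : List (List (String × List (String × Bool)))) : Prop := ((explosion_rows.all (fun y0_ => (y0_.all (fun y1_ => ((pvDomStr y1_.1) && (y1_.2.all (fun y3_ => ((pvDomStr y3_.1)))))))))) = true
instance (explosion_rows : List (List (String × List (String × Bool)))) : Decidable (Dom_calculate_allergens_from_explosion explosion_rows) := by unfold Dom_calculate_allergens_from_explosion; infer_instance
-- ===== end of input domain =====

-- B replaces A's 14 per-allergen rescans of the rows by one accumulating pass
-- building two sets, then a precedence resolution over ALLERGENS (alternative
-- decomposition, same cost).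

-- ===== PORT A =====
def ALLERGENS : List String :=
  ["Celery", "Cereals containing gluten", "Crustaceans", "Eggs", "Fish",
   "Lupin", "Milk", "Molluscs", "Mustard", "Nuts", "Peanuts",
   "Sesame seeds", "Soya", "Sulphur dioxide and sulphites"]

-- row.get('allergen_contains', {}).get(allergen) under truthiness
-- (the value is Option Bool: None is falsy, a bool is its own truth value)
def pvHasC (row : List (String × List (String × Bool))) (a : String) : Bool :=
  ((PySem.Dict.mk (PySem.Dict.getD (PySem.Dict.mk row) "allergen_contains" [])).get? a).getD false

def pvHasM (row : List (String × List (String × Bool))) (a : String) : Bool :=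
  ((PySem.Dict.mk (PySem.Dict.getD (PySem.Dict.mk row) "allergen_may_contain" [])).get? a).getD false

-- A's inner 'for row in explosion_rows' loop with its break and status variable
def pvLoopA (a : String) (rows : List (List (String × List (String × Bool)))) (status : String) : String :=
  match rows with
  | [] => status
  | row :: rest =>
    if pvHasC row a then "Contains"
    else pvLoopA a rest (if pvHasM row a then "May Contain" else status)

def calculate_allergens_from_explosion (explosion_rows : List (List (String × List (String × Bool)))) : List (String × String) :=
  (ALLERGENS.foldl
    (fun result allergen => result.insert allergen (pvLoopA allergen explosion_rows "Free From"))
    PySem.Dict.empty).items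

-- ===== PORT B =====
-- the single pass: for each row, mark every allergen seen as contained / may-contained
def pvScanB (explosion_rows : List (List (String × List (String × Bool)))) :
    PySem.Set String × PySem.Set String :=
  explosion_rows.foldl
    (fun s row =>
      let ac := PySem.Dict.getD (PySem.Dict.mk row) "allergen_contains" []
      let am := PySem.Dict.getD (PySem.Dict.mk row) "allergen_may_contain" []
      ALLERGENS.foldl
        (fun s allergen =>
          (if ((PySem.Dict.mk ac).get? allergen).getD false then PySem.Set.add s.1 allergen else s.1,
           if ((PySem.Dict.mk am).get? allergen).getD false then PySem.Set.add s.2 allergen else s.2))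
        s)
    (PySem.Set.empty, PySem.Set.empty)

def calculate_allergens_from_explosion_alt (explosion_rows : List (List (String × List (String × Bool)))) : List (String × String) :=
  let s := pvScanB explosion_rows
  -- the dict comprehension over the distinct keys ALLERGENS, as its items list
  ALLERGENS.map (fun allergen =>
    (allergen,
     if PySem.Set.contains s.1 allergen then "Contains"
     else if PySem.Set.contains s.2 allergen then "May Contain"
     else "Free From"))

-- ===== PRECONDITION & SPEC =====
def Spec_calculate_allergens_from_explosion (explosion_rows : List (List (String × List (String × Bool)))) (out : List (String × String)) : Prop := out = calculate_allergens_from_explosion_alt explosion_rows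
instance (explosion_rows : List (List (String × List (String × Bool)))) (out : List (String × String)) : Decidable (Spec_calculate_allergens_from_explosion explosion_rows out) := by unfold Spec_calculate_allergens_from_explosion; infer_instance

-- ===== CLAIM (what is proved, stated in full; the proofs are below) =====
def Claim_equal_calculate_allergens_from_explosion : Prop := ∀ (explosion_rows : List (List (String × List (String × Bool)))), Dom_calculate_allergens_from_explosion explosion_rows → Spec_calculate_allergens_from_explosion explosion_rows (calculate_allergens_from_explosion explosion_rows)

-- ===== LEMMAS AND PROOFS =====

-- A's inner loop computes the Contains / May Contain / Free From precedence
lemma pvLoopA_eq (a : String) (rows : List (List (String × List (String × Bool)))) (status : String) :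
    pvLoopA a rows status =
      if rows.any (fun r => pvHasC r a) then "Contains"
      else if rows.any (fun r => pvHasM r a) then "May Contain"
      else status := by
  induction rows generalizing status with
  | nil => simp [pvLoopA]
  | cons r rest ih =>
    simp only [pvLoopA, List.any_cons]
    by_cases hc : pvHasC r a
    · simp [hc]
    · by_cases hm : pvHasM r a <;> simp [hc, hm, ih]

-- membership in a conditional-add fold of a Set
lemma mem_foldl_condAdd (c : String → Bool) (x : String) (L : List String) (t : PySem.Set String) :
    x ∈ L.foldl (fun t a => if c a then PySem.Set.add t a else t) t ↔
      x ∈ t ∨ (x ∈ L ∧ c x) := by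
  induction L generalizing t with
  | nil => simp
  | cons b L ih =>
    simp only [List.foldl_cons, ih, List.mem_cons]
    by_cases hb : c b
    · simp only [hb, if_pos, PySem.Set.mem_add]
      constructor
      · rintro (⟨h | rfl⟩ | ⟨hL, hc⟩)
        · exact Or.inl h
        · exact Or.inr ⟨Or.inl rfl, hb⟩
        · exact Or.inr ⟨Or.inr hL, hc⟩
      · rintro (h | ⟨rfl | hL, hc⟩)
        · exact Or.inl (Or.inl h)
        · exact Or.inl (Or.inr rfl)
        · exact Or.inr ⟨hL, hc⟩
    · rw [if_neg hb]
      constructor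
      · tauto
      · rintro (h | ⟨rfl | hL, hcx⟩)
        · tauto
        · exact absurd hcx hb
        · tauto
-- the inner ALLERGENS fold acts on the two components independently
lemma innerfold_pair (row : List (String × List (String × Bool))) (L : List String)
    (s : PySem.Set String × PySem.Set String) :
    (L.foldl
      (fun s allergen =>
        (if pvHasC row allergen then PySem.Set.add s.1 allergen else s.1,
         if pvHasM row allergen then PySem.Set.add s.2 allergen else s.2)) s) =
    (L.foldl (fun t a => if pvHasC row a then PySem.Set.add t a else t) s.1,
     L.foldl (fun t a => if pvHasM row a then PySem.Set.add t a else t) s.2) := by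
  induction L generalizing s with
  | nil => rfl
  | cons b L ih => simp only [List.foldl_cons, ih]

lemma mem_pvScanB_fst (x : String) (rows : List (List (String × List (String × Bool)))) :
    x ∈ (pvScanB rows).1 ↔ x ∈ ALLERGENS ∧ rows.any (fun r => pvHasC r x) := by
  unfold pvScanB
  suffices h : ∀ (s : PySem.Set String × PySem.Set String),
      x ∈ (rows.foldl (fun s row =>
        ALLERGENS.foldl
          (fun s allergen =>
            (if pvHasC row allergen then PySem.Set.add s.1 allergen else s.1,
             if pvHasM row allergen then PySem.Set.add s.2 allergen else s.2)) s) s).1 ↔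
        x ∈ s.1 ∨ (x ∈ ALLERGENS ∧ rows.any (fun r => pvHasC r x)) by
    simpa [pvHasC, pvHasM] using h (PySem.Set.empty, PySem.Set.empty)
  induction rows with
  | nil => simp
  | cons r rest ih =>
    intro s
    rw [List.foldl_cons, ih, innerfold_pair]
    simp only [List.any_cons, mem_foldl_condAdd, Bool.or_eq_true]
    by_cases hc : pvHasC r x <;> by_cases hx : x ∈ ALLERGENS <;> simp [hc, hx]

lemma mem_pvScanB_snd (x : String) (rows : List (List (String × List (String × Bool)))) :
    x ∈ (pvScanB rows).2 ↔ x ∈ ALLERGENS ∧ rows.any (fun r => pvHasM r x) := by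
  unfold pvScanB
  suffices h : ∀ (s : PySem.Set String × PySem.Set String),
      x ∈ (rows.foldl (fun s row =>
        ALLERGENS.foldl
          (fun s allergen =>
            (if pvHasC row allergen then PySem.Set.add s.1 allergen else s.1,
             if pvHasM row allergen then PySem.Set.add s.2 allergen else s.2)) s) s).2 ↔
        x ∈ s.2 ∨ (x ∈ ALLERGENS ∧ rows.any (fun r => pvHasM r x)) by
    simpa [pvHasC, pvHasM] using h (PySem.Set.empty, PySem.Set.empty)
  induction rows with
  | nil => simp
  | cons r rest ih =>
    intro s
    rw [List.foldl_cons, ih, innerfold_pair]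
    simp only [List.any_cons, mem_foldl_condAdd, Bool.or_eq_true]
    by_cases hm : pvHasM r x <;> by_cases hx : x ∈ ALLERGENS <;> simp [hm, hx]

-- ===== VERDICT (by name: the statement is the Claim_ definition above) =====
theorem calculate_allergens_from_explosion_spec : Claim_equal_calculate_allergens_from_explosion := by
  intro rows _
  unfold Spec_calculate_allergens_from_explosion
  unfold calculate_allergens_from_explosion calculate_allergens_from_explosion_alt
  rw [PySem.Dict.items_foldl_insert_fresh _ _ _ _ (by intro a _; rfl) (by decide)]
  simp only [PySem.Dict.empty, List.nil_append]
  apply List.map_congr_left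
  intro a ha
  refine Prod.ext rfl ?_
  rw [pvLoopA_eq]
  have h1 := mem_pvScanB_fst a rows
  have h2 := mem_pvScanB_snd a rows
  by_cases hc : rows.any (fun r => pvHasC r a) <;>
    by_cases hm : rows.any (fun r => pvHasM r a) <;>
      simp [hc, hm, ha, h1, h2, PySem.Set.contains_eq_listContains] at *
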